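-- pv_equiv track=rewrite | github.com/shaayok/cereaura_assistant | chat.py | compose_context
-- ===== SOURCE A (Python) =====
-- def compose_context(documents, metadatas, cap=12000) -> str:
--     out, used = [], 0
--     for d, m in zip(documents, metadatas):
--         src = m.get("file", m.get("source", "kb"))
--         seg = f"\n---\nSource: {src}\n---\n{d}"
--         if used + len(seg) > cap:
--             break
--         out.append(seg)
--         used += len(seg)
--     return "\n".join(out)
-- ===== SOURCE B (Python) =====
-- def compose_context(documents, metadatas, cap=12000) -> str:
--     segs = [
--         "\n---\nSource: %s\n---\n%s" % (m.get("file", m.get("source", "kb")), d)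
--         for d, m in zip(documents, metadatas)
--     ]
--     prefix = []
--     t = 0
--     for s in segs:
--         t += len(s)
--         prefix.append(t)
--     k = 0
--     while k < len(prefix) and prefix[k] <= cap:
--         k += 1
--     return "\n".join(segs[:k])
-- ===== Notes on version B (the rewrite author's own statement) =====
-- stated objective: alternative
-- what changed: Replaces the single break-on-overflow accumulation loop by a pipeline: build all formatted segments with a comprehension, compute the running prefix sums of their lengths, count how many leading prefix sums stay within the cap, and join that prefix slice.
import Mathlib
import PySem

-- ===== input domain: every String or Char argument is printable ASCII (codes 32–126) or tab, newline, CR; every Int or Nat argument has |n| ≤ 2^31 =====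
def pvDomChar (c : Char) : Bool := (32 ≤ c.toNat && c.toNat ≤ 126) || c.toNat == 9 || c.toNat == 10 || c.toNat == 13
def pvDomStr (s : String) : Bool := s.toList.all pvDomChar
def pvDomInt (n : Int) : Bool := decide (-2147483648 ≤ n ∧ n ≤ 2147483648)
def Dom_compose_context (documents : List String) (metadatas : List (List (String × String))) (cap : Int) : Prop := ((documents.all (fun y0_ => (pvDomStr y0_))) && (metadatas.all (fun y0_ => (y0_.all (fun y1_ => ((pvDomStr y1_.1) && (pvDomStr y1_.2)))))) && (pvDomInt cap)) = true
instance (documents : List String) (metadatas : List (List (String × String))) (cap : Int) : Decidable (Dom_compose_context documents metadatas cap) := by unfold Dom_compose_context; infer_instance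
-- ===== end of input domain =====

-- ===== PORT A =====
-- literal port of A: one loop accumulating (out, used) and breaking at the first overflow
def composeLoopA (pairs : List (String × List (String × String))) (out : List String)
    (used : Int) (cap : Int) : List String :=
  match pairs with
  | [] => out
  | (d, m) :: rest =>
      let src := ((m.lookup "file").getD ((m.lookup "source").getD "kb"))
      let seg := "\n---\nSource: " ++ src ++ "\n---\n" ++ d
      if used + PySem.Str.len seg > cap then out
      else composeLoopA rest (out ++ [seg]) (used + PySem.Str.len seg) cap

def compose_context (documents : List String) (metadatas : List (List (String × String))) (cap : Int) : String :=
  PySem.Str.join "\n" (composeLoopA (documents.zip metadatas) [] 0 cap)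

-- ===== PORT B =====
-- B-side helpers: the comprehension's segment formatter and the leading-count while loop
def altSeg (dm : String × List (String × String)) : String :=
  "\n---\nSource: " ++ ((dm.2.lookup "file").getD ((dm.2.lookup "source").getD "kb")) ++ "\n---\n" ++ dm.1

def countLeadingLe (pref : List Int) (cap : Int) : Nat :=
  match pref with
  | [] => 0
  | t :: rest => if t ≤ cap then countLeadingLe rest cap + 1 else 0

def compose_context_alt (documents : List String) (metadatas : List (List (String × String))) (cap : Int) : String :=
  let segs := (documents.zip metadatas).map altSeg
  let pref := (segs.foldl (fun st s => (st.1 + PySem.Str.len s, st.2 ++ [st.1 + PySem.Str.len s]))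
      ((0 : Int), ([] : List Int))).2
  let k := countLeadingLe pref cap
  PySem.Str.join "\n" (segs.take k)

-- ===== PRECONDITION & SPEC =====
def Spec_compose_context (documents : List String) (metadatas : List (List (String × String))) (cap : Int) (out : String) : Prop := out = compose_context_alt documents metadatas cap
instance (documents : List String) (metadatas : List (List (String × String))) (cap : Int) (out : String) : Decidable (Spec_compose_context documents metadatas cap out) := by unfold Spec_compose_context; infer_instance

-- ===== CLAIM (what is proved, stated in full; the proofs are below) =====
def Claim_equal_compose_context : Prop := ∀ (documents : List String) (metadatas : List (List (String × String))) (cap : Int), Dom_compose_context documents metadatas cap → Spec_compose_context documents metadatas cap (compose_context documents metadatas cap)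

-- ===== LEMMAS AND PROOFS =====
-- proof-side characterisation of A's break loop: the greedy pref of the segment list
def greedy (segs : List String) (used : Int) (cap : Int) : List String :=
  match segs with
  | [] => []
  | s :: ss => if used + PySem.Str.len s > cap then [] else s :: greedy ss (used + PySem.Str.len s) cap

-- proof-side characterisation of B's pref-sum loop
def prefixFrom (lens : List Int) (t : Int) : List Int :=
  match lens with
  | [] => []
  | L :: rest => (t + L) :: prefixFrom rest (t + L)

theorem composeLoopA_eq_greedy (pairs : List (String × List (String × String)))
    (out : List String) (used cap : Int) :
    composeLoopA pairs out used cap = out ++ greedy (pairs.map altSeg) used cap := by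
  induction pairs generalizing out used with
  | nil => simp [composeLoopA, greedy]
  | cons p rest ih =>
      obtain ⟨d, m⟩ := p
      simp only [composeLoopA, List.map_cons, greedy, altSeg]
      split_ifs with h
      · simp
      · rw [ih]; simp

theorem foldl_prefix_eq (segs : List String) (t : Int) (acc : List Int) :
    (segs.foldl (fun st s => (st.1 + PySem.Str.len s, st.2 ++ [st.1 + PySem.Str.len s])) (t, acc)).2
      = acc ++ prefixFrom (segs.map PySem.Str.len) t := by
  induction segs generalizing t acc with
  | nil => simp [prefixFrom]
  | cons s ss ih => rw [List.foldl_cons]; rw [ih]; simp [prefixFrom]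

theorem greedy_eq_take (segs : List String) (used cap : Int) :
    greedy segs used cap
      = segs.take (countLeadingLe (prefixFrom (segs.map PySem.Str.len) used) cap) := by
  induction segs generalizing used with
  | nil => simp [greedy]
  | cons s ss ih =>
      simp only [greedy, List.map_cons, prefixFrom, countLeadingLe]
      by_cases h : cap < used + (s.length : Int)
      · have h2 : ¬ used + (s.length : Int) ≤ cap := by omega
        simp [h, h2]
      · have h2 : used + (s.length : Int) ≤ cap := by omega
        simp [h, h2, ih]

-- ===== VERDICT (by name: the statement is the Claim_ definition above) =====
theorem compose_context_spec : Claim_equal_compose_context := by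
  intro documents metadatas cap _
  unfold Spec_compose_context compose_context compose_context_alt
  simp only [composeLoopA_eq_greedy, greedy_eq_take, foldl_prefix_eq, List.nil_append]
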